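-- pv_equiv track=rewrite | github.com/JonaMata/AdventOfCode | 2024/day_21/day_21.py | reconstruct_paths
-- ===== SOURCE A (Python) =====
-- def reconstruct_paths(root, parents, path):
--     path.append(root)
--     if root not in parents:
--         return [path]
--     paths = []
--     for parent in parents[root][0]:
--         paths.extend(reconstruct_paths(parent, parents, path.copy()))
--     return paths
-- ===== SOURCE B (Python) =====
-- def reconstruct_paths(root, parents, path):
--     path.append(root)
--     if root not in parents:
--         return [path]
--
--     def suffixes(node):
--         if node not in parents:
--             return [[node]]
--         return [[node] + s for p in parents[node][0] for s in suffixes(p)]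
--
--     return [path + s for p in parents[root][0] for s in suffixes(p)]
-- ===== Notes on version B (the rewrite author's own statement) =====
-- stated objective: alternative
-- what changed: B replaces A's prefix-threading recursion (which copies the growing path at every branch and extends an accumulator) by a pure bottom-up helper enumerating path suffixes per node plus one comprehension that prefixes the already-built path.
import Mathlib
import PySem

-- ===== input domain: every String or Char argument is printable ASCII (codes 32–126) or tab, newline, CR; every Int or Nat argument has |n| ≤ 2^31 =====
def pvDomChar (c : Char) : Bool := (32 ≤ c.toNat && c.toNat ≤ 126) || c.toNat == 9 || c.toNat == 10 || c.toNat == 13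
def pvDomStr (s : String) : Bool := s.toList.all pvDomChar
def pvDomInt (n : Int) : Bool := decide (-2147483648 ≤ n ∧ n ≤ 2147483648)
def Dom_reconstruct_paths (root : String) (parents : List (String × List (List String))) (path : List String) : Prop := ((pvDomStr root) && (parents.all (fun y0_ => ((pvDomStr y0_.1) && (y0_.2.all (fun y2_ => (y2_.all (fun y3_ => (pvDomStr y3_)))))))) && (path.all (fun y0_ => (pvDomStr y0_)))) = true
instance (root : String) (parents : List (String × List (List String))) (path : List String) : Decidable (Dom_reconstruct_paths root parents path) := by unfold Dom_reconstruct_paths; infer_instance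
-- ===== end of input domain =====

-- ===== PORT A =====
-- B enumerates per-node path suffixes bottom-up instead of threading and copying the growing
-- prefix down the recursion (objective: alternative decomposition; both Pythons append root to the
-- caller's `path` in place identically; the equivalence proved is about the return value).
-- Python A is recursive with no termination guarantee (it raises RecursionError on a cycle and
-- IndexError on an empty parent-list value); the port uses a fuel of parents.length + 1, which
-- never runs out on inputs satisfying Pre_ (acyclic, no empty values), and returns [] where the
-- Python raises (those inputs are outside Pre_).
def pvGoA (parents : List (String × List (List String))) (fuel : Nat) (root : String)
    (path : List String) : List (List String) :=
  let path' := path ++ [root]                       -- path.append(root)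
  match PySem.Dict.get? (PySem.Dict.mk parents) root with
  | none => [path']                                 -- root not in parents: return [path]
  | some v =>
    match PySem.List.pyGet? v 0 with
    | none => []                                    -- parents[root][0] raises IndexError (outside Pre_)
    | some children =>
      match fuel with
      | 0 => []                                     -- RecursionError (outside Pre_)
      | Nat.succ n =>
        children.foldl (fun acc p => acc ++ pvGoA parents n p path') []   -- paths.extend(...)
  termination_by fuel

def reconstruct_paths (root : String) (parents : List (String × List (List String))) (path : List String) : List (List String) :=
  pvGoA parents (parents.length + 1) root path

-- ===== PORT B =====
-- suffixes(node): all root-to-leaf suffix paths starting at node (same fuel device as port A).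
def pvSuffixes (parents : List (String × List (List String))) (fuel : Nat) (node : String) :
    List (List String) :=
  match PySem.Dict.get? (PySem.Dict.mk parents) node with
  | none => [[node]]
  | some v =>
    match PySem.List.pyGet? v 0 with
    | none => []
    | some children =>
      match fuel with
      | 0 => []
      | Nat.succ n =>
        children.flatMap (fun p => (pvSuffixes parents n p).map (fun s => node :: s))
  termination_by fuel

def reconstruct_paths_alt (root : String) (parents : List (String × List (List String))) (path : List String) : List (List String) :=
  let path' := path ++ [root]                       -- path.append(root)
  match PySem.Dict.get? (PySem.Dict.mk parents) root with
  | none => [path']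
  | some v =>
    match PySem.List.pyGet? v 0 with
    | none => []
    | some children =>
      children.flatMap (fun p => (pvSuffixes parents parents.length p).map (fun s => path' ++ s))

-- ===== PRECONDITION & SPEC =====
-- children of a node along the edges A follows: first list of its dict value ([] if absent/empty).
def pvChildren (parents : List (String × List (List String))) (k : String) : List String :=
  match PySem.Dict.get? (PySem.Dict.mk parents) k with
  | some (c :: _) => c
  | _ => []

def pvReachStep (parents : List (String × List (List String))) (s : List String) : List String :=
  (s ++ s.flatMap (pvChildren parents)).dedup

-- Nodes A's recursion can visit: everything reachable from root along the child edges.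
def pvReach (root : String) (parents : List (String × List (List String))) : List String :=
  (pvReachStep parents)^[parents.length + 1] [root]

-- Pre_ excludes exactly the inputs on which Python A raises: a node reachable from root whose
-- dict value is the empty list (IndexError on parents[k][0]) or that lies on a reachable cycle
-- of the parent graph (RecursionError).
def Pre_reconstruct_paths (root : String) (parents : List (String × List (List String))) (path : List String) : Prop :=
  (∀ k ∈ pvReach root parents, ∀ v, PySem.Dict.get? (PySem.Dict.mk parents) k = some v → v ≠ []) ∧
  (∀ k ∈ pvReach root parents, k ∉ (pvReachStep parents)^[parents.length + 1] (pvChildren parents k))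

instance (root : String) (parents : List (String × List (List String))) (path : List String) : Decidable (Pre_reconstruct_paths root parents path) := by unfold Pre_reconstruct_paths; infer_instance

def pvWitness_reconstruct_paths : String × (List (String × List (List String))) × List String :=
  ("a", [("a", [["b"], ["x"]])], ["s"])

def Spec_reconstruct_paths (root : String) (parents : List (String × List (List String))) (path : List String) (out : List (List String)) : Prop := out = reconstruct_paths_alt root parents path
instance (root : String) (parents : List (String × List (List String))) (path : List String) (out : List (List String)) : Decidable (Spec_reconstruct_paths root parents path out) := by unfold Spec_reconstruct_paths; infer_instance

-- ===== CLAIM (what is proved, stated in full; the proofs are below) =====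
def Claim_equal_reconstruct_paths : Prop := ∀ (root : String) (parents : List (String × List (List String))) (path : List String), Dom_reconstruct_paths root parents path → Pre_reconstruct_paths root parents path → Spec_reconstruct_paths root parents path (reconstruct_paths root parents path)

-- ===== LEMMAS AND PROOFS =====
-- The key fact: A's prefix-threading recursion equals B's suffix enumeration mapped under the
-- prefix, at every fuel value (the out-of-fuel and IndexError branches of both ports agree too).
theorem pvGoA_eq_suffixes (parents : List (String × List (List String))) (fuel : Nat) :
    ∀ (node : String) (path : List String),
      pvGoA parents fuel node path = (pvSuffixes parents fuel node).map (fun s => path ++ s) := by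
  induction fuel with
  | zero =>
    intro node path
    unfold pvGoA pvSuffixes
    cases h1 : PySem.Dict.get? (PySem.Dict.mk parents) node with
    | none => simp
    | some v =>
      cases h2 : PySem.List.pyGet? v 0 with
      | none => simp [h2]
      | some children => simp [h2]
  | succ n ih =>
    intro node path
    unfold pvGoA pvSuffixes
    cases h1 : PySem.Dict.get? (PySem.Dict.mk parents) node with
    | none => simp
    | some v =>
      cases h2 : PySem.List.pyGet? v 0 with
      | none => simp [h2]
      | some children =>
        simp only [h2, PySem.List.foldl_append_eq_flatMap, List.nil_append, List.map_flatMap]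
        refine List.flatMap_congr (fun p _ => ?_)
        simp [ih, Function.comp, List.map_map, List.append_assoc]

-- ===== VERDICT (by name: the statement is the Claim_ definition above) =====
theorem reconstruct_paths_spec : Claim_equal_reconstruct_paths := by
  intro root parents path _ _
  unfold Spec_reconstruct_paths reconstruct_paths reconstruct_paths_alt
  unfold pvGoA
  cases h1 : PySem.Dict.get? (PySem.Dict.mk parents) root with
  | none => simp
  | some v =>
    cases h2 : PySem.List.pyGet? v 0 with
    | none => simp [h2]
    | some children =>
      simp only [h2, PySem.List.foldl_append_eq_flatMap, List.nil_append]
      refine List.flatMap_congr (fun p _ => ?_)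
      exact pvGoA_eq_suffixes parents parents.length p _
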